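-- pv_equiv track=rewrite | github.com/donc0n/programmers-challenges | DP/solution1.py | solution
-- ===== SOURCE A (Python) =====
-- def operation(A, B):
--     # 사칙연산 + - * /
--     if A != 0 and B != 0:
--         return list(filter(lambda x: x != 0, [A+B, A-B, B-A, A*B, A//B, B//A]))
--     else:
--         return -1
--
-- def solution(N, number): # O(1)
--     # _N[i]는 N을 i번 써서 만들 수 있는 숫자들의 집합
--     _N = [{}] + [set([int(str(N)*i)]) for i in range(1,9)] # N, NN, NNN, NNNN... 인 경우
--     for i in range(1, 9): # _N[i] generate
--         for j in range(1, i//2 + 1):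
--             for A in _N[j]:
--                 for B in _N[i-j]:
--                     for res in operation(A, B):
--                         _N[i].add(res)
--         if number in _N[i]:
--             return i
--     return -1
-- ===== SOURCE B (Python) =====
-- def operation(A, B):
--     # 사칙연산 + - * /
--     if A != 0 and B != 0:
--         return list(filter(lambda x: x != 0, [A+B, A-B, B-A, A*B, A//B, B//A]))
--     else:
--         return -1
--
-- def solution(N, number):
--     # Top-down memoized recursion; the queried level is never materialized:
--     # hits(i) scans the candidate pairs of the FULL split range 1..i-1 directly
--     # (operation's result set is symmetric, so the full range seen pairwise equals
--     # the materialized half-range set), building only levels below i on demand.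
--     cache = {}
--     def build(i):
--         if i in cache:
--             return cache[i]
--         s = set([int(str(N) * i)])
--         for j in range(1, i // 2 + 1):
--             for A in build(j):
--                 for B in build(i - j):
--                     for res in operation(A, B):
--                         s.add(res)
--         cache[i] = s
--         return s
--     def hits(i):
--         if number == int(str(N) * i):
--             return True
--         for j in range(1, i):
--             for A in build(j):
--                 for B in build(i - j):
--                     if number in operation(A, B):
--                         return True
--         return False
--     for i in range(1, 9):
--         if hits(i):
--             return i
--     return -1
-- ===== Notes on version B (the rewrite author's own statement) =====
-- stated objective: alternative
-- what changed: Replaces A's bottom-up 9-slot table plus membership test by a top-down memoized recursion build(i) for the lower levels and a hits(i) check that never materializes the queried level: it scans candidate pairs over the full split range 1..i-1 directly (legal because operation's result set is symmetric in its arguments).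
import Mathlib
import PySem

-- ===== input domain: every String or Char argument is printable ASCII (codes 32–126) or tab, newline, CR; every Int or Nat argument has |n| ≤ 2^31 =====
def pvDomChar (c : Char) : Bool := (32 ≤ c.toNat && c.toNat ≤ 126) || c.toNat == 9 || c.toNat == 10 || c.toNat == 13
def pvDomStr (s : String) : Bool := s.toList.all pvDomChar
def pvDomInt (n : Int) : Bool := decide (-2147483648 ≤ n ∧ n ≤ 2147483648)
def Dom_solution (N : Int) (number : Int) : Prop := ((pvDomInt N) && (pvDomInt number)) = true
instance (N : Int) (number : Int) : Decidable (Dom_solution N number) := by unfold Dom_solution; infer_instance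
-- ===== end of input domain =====

-- B is an alternative decomposition (top-down memoized recursion over the full split
-- range, first-hit search) of A's bottom-up half-range table; equal on all of Pre_.

-- ===== PORT A =====
-- int(str(N)*i); for N < 0, i ≥ 2 Python raises ValueError (outside Pre_): the port
-- returns the dead default 0 there.  Shared leaf expression of both Pythons.
def repInt (N : Int) (i : Nat) : Int :=
  (PySem.Int.ofChars? (List.flatten (List.replicate i (PySem.Int.toChars N)))).getD 0

-- A's helper; Python returns -1 (not a list) when A or B is 0, and iterating it raises
-- TypeError — unreachable under Pre_ (the sets never contain 0 for N ≥ 1, and for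
-- N = 0 the answer 1 is returned before any operation call): the port returns [].
def operation (A B : Int) : List Int :=
  if A ≠ 0 ∧ B ≠ 0 then
    ([A + B, A - B, B - A, A * B, PySem.Int.floordiv A B, PySem.Int.floordiv B A]).filter
      (fun x => x != 0)
  else []

-- the j/A/B/res nested loops filling _N[i] from the completed levels 1..i-1
-- (done.getD (j-1) [] is _N[j]); _N[i] starts as set([int(str(N)*i)])
def fillLevel (N : Int) (done : List (PySem.Set Int)) (i : Nat) : PySem.Set Int :=
  (List.range' 1 (i / 2)).foldl (fun s j =>
    (done.getD (j - 1) []).foldl (fun s A =>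
      (done.getD (i - j - 1) []).foldl (fun s B =>
        (operation A B).foldl (fun s res => PySem.Set.add s res) s) s) s)
    (PySem.Set.ofList [repInt N i])

-- the 'for i in range(1, 9)' loop with its early return, carrying the filled levels
def loopA (N number : Int) : List Nat → List (PySem.Set Int) → Int
  | [], _ => -1
  | i :: rest, done =>
    let s := fillLevel N done i
    if number ∈ s then (i : Int) else loopA N number rest (done ++ [s])

def solution (N : Int) (number : Int) : Int :=
  loopA N number (List.range' 1 8) []

-- ===== PORT B =====
-- Source B's build(i): the cache dict is threaded explicitly (Lean is pure), and the
-- fuel argument (always ≥ i at every call, decreasing by 1 per level) is the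
-- termination device; memoStep is the body of build's 'for j in …' loop.
def memoStep (bm : Nat → PySem.Dict Nat (PySem.Set Int) →
      PySem.Set Int × PySem.Dict Nat (PySem.Set Int)) (i : Nat)
    (p : PySem.Set Int × PySem.Dict Nat (PySem.Set Int)) (j : Nat) :
    PySem.Set Int × PySem.Dict Nat (PySem.Set Int) :=
  let q1 := bm j p.2
  let q2 := bm (i - j) q1.2
  (q1.1.foldl (fun s A =>
      q2.1.foldl (fun s B =>
        (operation A B).foldl (fun s res => PySem.Set.add s res) s) s) p.1,
   q2.2)

def buildMemo (N : Int) : Nat → Nat → PySem.Dict Nat (PySem.Set Int) →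
    PySem.Set Int × PySem.Dict Nat (PySem.Set Int)
  | 0, _, cache => ([], cache)   -- fuel exhausted: unreachable, fuel ≥ i ≥ 1 at every call
  | fuel + 1, i, cache =>
    match PySem.Dict.get? cache i with
    | some s => (s, cache)       -- 'if i in cache: return cache[i]'
    | none =>
      let p := (List.range' 1 (i / 2)).foldl
        (memoStep (fun k c => buildMemo N fuel k c) i)
        (PySem.Set.ofList [repInt N i], cache)
      (p.1, PySem.Dict.insert p.2 i p.1)   -- 'cache[i] = s; return s'

-- Source B's hits(i): scan the candidate pairs of the full split range 1..i-1 without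
-- materializing level i (the or-accumulator is the ported early 'return True')
def hitsMemo (N number : Int) (i : Nat) (cache : PySem.Dict Nat (PySem.Set Int)) :
    Bool × PySem.Dict Nat (PySem.Set Int) :=
  if number == repInt N i then (true, cache)
  else
    (List.range' 1 (i - 1)).foldl
      (fun (p : Bool × PySem.Dict Nat (PySem.Set Int)) j =>
        let q1 := buildMemo N i j p.2
        let q2 := buildMemo N i (i - j) q1.2
        (p.1 || q1.1.any (fun A => q2.1.any (fun B => decide (number ∈ operation A B))),
         q2.2))
      (false, cache)

-- 'for i in range(1, 9): if hits(i): return i' (the cache is shared across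
-- iterations, exactly as in Source B)
def searchB (N number : Int) : List Nat → PySem.Dict Nat (PySem.Set Int) → Int
  | [], _ => -1
  | i :: rest, cache =>
    let p := hitsMemo N number i cache
    if p.1 then (i : Int) else searchB N number rest p.2

def solution_alt (N : Int) (number : Int) : Int :=
  searchB N number (List.range' 1 8) PySem.Dict.empty

-- ===== PRECONDITION & SPEC =====
-- Pre_ is exactly where Python A returns: N < 0 raises ValueError building the base
-- table, and N = 0 with number ≠ 0 raises TypeError iterating operation(0, 0) = -1.
def Pre_solution (N : Int) (number : Int) : Prop := 1 ≤ N ∨ (N = 0 ∧ number = 0)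
instance (N : Int) (number : Int) : Decidable (Pre_solution N number) := by
  unfold Pre_solution; infer_instance

def pvWitness_solution : Int × Int := (5, 12)

def Spec_solution (N : Int) (number : Int) (out : Int) : Prop := out = solution_alt N number
instance (N : Int) (number : Int) (out : Int) : Decidable (Spec_solution N number out) := by
  unfold Spec_solution; infer_instance

-- ===== CLAIM (what is proved, stated in full; the proofs are below) =====
def Claim_equal_solution : Prop := ∀ (N : Int) (number : Int), Dom_solution N number →
  Pre_solution N number → Spec_solution N number (solution N number)

-- ===== LEMMAS AND PROOFS =====

-- the numbers reachable from exactly i copies of N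
inductive Reach (N : Int) : Nat → Int → Prop
  | base (i : Nat) (h : 1 ≤ i) : Reach N i (repInt N i)
  | op (j k : Nat) (A B x : Int) : Reach N j A → Reach N k B →
      x ∈ operation A B → Reach N (j + k) x

theorem reach_pos {N : Int} {i : Nat} {x : Int} (h : Reach N i x) : 1 ≤ i := by
  induction h with
  | base i h => exact h
  | op j k A B x _ _ _ ihj ihk => omega

-- operation's RESULT SET is symmetric in its arguments
theorem operation_comm (A B x : Int) : x ∈ operation A B ↔ x ∈ operation B A := by
  unfold operation
  by_cases h : A ≠ 0 ∧ B ≠ 0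
  · have h' : B ≠ 0 ∧ A ≠ 0 := ⟨h.2, h.1⟩
    simp only [if_pos h, if_pos h', List.mem_filter, List.mem_cons, List.not_mem_nil,
      or_false]
    constructor <;> rintro ⟨hm, hz⟩ <;> refine ⟨?_, hz⟩ <;>
      rcases hm with h1 | h1 | h1 | h1 | h1 | h1 <;> subst h1 <;>
      simp [Int.add_comm, Int.mul_comm]
  · have h' : ¬ (B ≠ 0 ∧ A ≠ 0) := fun hc => h ⟨hc.2, hc.1⟩
    simp [if_neg h, if_neg h']

-- membership through a fold that only ever adds elements
theorem mem_foldl_gen {α : Type} (f : PySem.Set Int → α → PySem.Set Int)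
    (P : α → Int → Prop) (hf : ∀ s a x, x ∈ f s a ↔ x ∈ s ∨ P a x) :
    ∀ (l : List α) (s : PySem.Set Int) (x : Int),
      x ∈ l.foldl f s ↔ x ∈ s ∨ ∃ a ∈ l, P a x := by
  intro l
  induction l with
  | nil => simp
  | cons a t ih =>
    intro s x
    simp only [List.foldl_cons, ih, hf, List.mem_cons]
    constructor
    · rintro ((h | h) | ⟨b, hb, hp⟩)
      · exact Or.inl h
      · exact Or.inr ⟨a, Or.inl rfl, h⟩
      · exact Or.inr ⟨b, Or.inr hb, hp⟩
    · rintro (h | ⟨b, (rfl | hb), hp⟩)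
      · exact Or.inl (Or.inl h)
      · exact Or.inl (Or.inr hp)
      · exact Or.inr ⟨b, hb, hp⟩

theorem mem_res_fold (listRes : List Int) (s : PySem.Set Int) (x : Int) :
    x ∈ listRes.foldl (fun s res => PySem.Set.add s res) s ↔ x ∈ s ∨ x ∈ listRes := by
  have := mem_foldl_gen (fun s res => PySem.Set.add s res) (fun res x => x = res)
    (fun s a x => PySem.Set.mem_add s a x) listRes s x
  simpa [eq_comm] using this

theorem mem_AB_fold (lA lB : List Int) (s : PySem.Set Int) (x : Int) :
    x ∈ lA.foldl (fun s A =>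
        lB.foldl (fun s B =>
          (operation A B).foldl (fun s res => PySem.Set.add s res) s) s) s ↔
      x ∈ s ∨ ∃ A ∈ lA, ∃ B ∈ lB, x ∈ operation A B := by
  refine mem_foldl_gen _ (fun A x => ∃ B ∈ lB, x ∈ operation A B) ?_ lA s x
  intro s A x
  refine mem_foldl_gen _ (fun B x => x ∈ operation A B) ?_ lB s x
  intro s B x
  exact mem_res_fold _ s x

theorem mem_fillLevel (N : Int) (done : List (PySem.Set Int)) (i : Nat) (x : Int) :
    x ∈ fillLevel N done i ↔ x = repInt N i ∨
      ∃ j ∈ List.range' 1 (i / 2), ∃ A ∈ done.getD (j - 1) [],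
        ∃ B ∈ done.getD (i - j - 1) [], x ∈ operation A B := by
  unfold fillLevel
  have := mem_foldl_gen
    (fun s j =>
      (done.getD (j - 1) []).foldl (fun s A =>
        (done.getD (i - j - 1) []).foldl (fun s B =>
          (operation A B).foldl (fun s res => PySem.Set.add s res) s) s) s)
    (fun j x => ∃ A ∈ done.getD (j - 1) [], ∃ B ∈ done.getD (i - j - 1) [],
      x ∈ operation A B)
    (fun s j x => mem_AB_fold _ _ s x)
    (List.range' 1 (i / 2)) (PySem.Set.ofList [repInt N i]) x
  simpa [PySem.Set.mem_ofList] using this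

-- A's table of completed levels 1..n (value-level: the early return only stops the
-- loop, it never changes a completed level)
def tableA (N : Int) : Nat → List (PySem.Set Int)
  | 0 => []
  | n + 1 => tableA N n ++ [fillLevel N (tableA N n) (n + 1)]

theorem tableA_length (N : Int) : ∀ n, (tableA N n).length = n := by
  intro n
  induction n with
  | zero => rfl
  | succ n ih => simp [tableA, ih]

theorem tableA_getD (N : Int) :
    ∀ n i, 1 ≤ i → i ≤ n →
      (tableA N n).getD (i - 1) [] = fillLevel N (tableA N (i - 1)) i := by
  intro n
  induction n with
  | zero => intro i h1 h2; omega
  | succ n ih =>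
    intro i h1 h2
    by_cases hi : i ≤ n
    · rw [tableA, List.getD_append _ _ _ _ (by rw [tableA_length]; omega)]
      exact ih i h1 hi
    · have : i = n + 1 := by omega
      subst this
      rw [tableA]
      have hlen : (tableA N n).length = n := tableA_length N n
      have : (tableA N n ++ [fillLevel N (tableA N n) (n + 1)]).getD (n + 1 - 1) [] =
          fillLevel N (tableA N n) (n + 1) := by
        have h' : n + 1 - 1 = (tableA N n).length + 0 := by omega
        rw [h', List.getD_append_right _ _ _ _ (by omega)]
        simp
      rw [this]
      norm_num

-- A's level set i (what _N[i] holds when the membership test runs) has exactly the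
-- Reach N i members
theorem level_reach (N : Int) :
    ∀ i, 1 ≤ i → ∀ x, x ∈ fillLevel N (tableA N (i - 1)) i ↔ Reach N i x := by
  intro i
  induction i using Nat.strong_induction_on with
  | _ i ih =>
    intro h1 x
    rw [mem_fillLevel]
    constructor
    · rintro (rfl | ⟨j, hj, A, hA, B, hB, hop⟩)
      · exact Reach.base i h1
      · rw [List.mem_range'] at hj
        obtain ⟨m, hm1, hm2⟩ := hj
        have hj1 : 1 ≤ j := by omega
        have hj2 : j ≤ i / 2 := by omega
        have hi2 : 2 ≤ i := by omega
        have hjlt : j ≤ i - 1 := by omega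
        have hkj : 1 ≤ i - j := by omega
        have hkj2 : i - j ≤ i - 1 := by omega
        rw [tableA_getD N (i - 1) j hj1 hjlt] at hA
        rw [tableA_getD N (i - 1) (i - j) hkj hkj2] at hB
        have hA' : Reach N j A := ((ih j (by omega)) hj1 A).1 hA
        have hB' : Reach N (i - j) B := ((ih (i - j) (by omega)) hkj B).1 hB
        have := Reach.op j (i - j) A B x hA' hB' hop
        rwa [show j + (i - j) = i by omega] at this
    · intro hr
      -- invert one step of the derivation (Reach is not inductively consumed here:
      -- we case on the last rule)
      cases hr with
      | base _ _ => exact Or.inl rfl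
      | op j k A B _ hA hB hop =>
        have hj : 1 ≤ j := reach_pos hA
        have hk : 1 ≤ k := reach_pos hB
        by_cases hsplit : j ≤ (j + k) / 2
        · refine Or.inr ⟨j, ?_, A, ?_, B, ?_, hop⟩
          · rw [List.mem_range']; exact ⟨j - 1, by omega, by omega⟩
          · rw [tableA_getD N (j + k - 1) j hj (by omega)]
            exact ((ih j (by omega)) hj A).2 hA
          · rw [tableA_getD N (j + k - 1) (j + k - j) (by omega) (by omega)]
            have : j + k - j = k := by omega
            rw [this]
            exact ((ih k (by omega)) hk B).2 hB
        · -- j is the larger half: use the split k + j and operation's symmetry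
          refine Or.inr ⟨k, ?_, B, ?_, A, ?_, (operation_comm A B _).1 hop⟩
          · rw [List.mem_range']; exact ⟨k - 1, by omega, by omega⟩
          · rw [tableA_getD N (j + k - 1) k hk (by omega)]
            exact ((ih k (by omega)) hk B).2 hB
          · rw [tableA_getD N (j + k - 1) (j + k - k) (by omega) (by omega)]
            have : j + k - k = j := by omega
            rw [this]
            exact ((ih j (by omega)) hj A).2 hA

-- the memoization cache only ever holds correct level sets
def InvCache (N : Int) (cache : PySem.Dict Nat (PySem.Set Int)) : Prop :=
  ∀ k s, PySem.Dict.get? cache k = some s → 1 ≤ k ∧ ∀ x, x ∈ s ↔ Reach N k x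

theorem memoFold_spec (N : Int) (i bound : Nat)
    (bm : Nat → PySem.Dict Nat (PySem.Set Int) →
      PySem.Set Int × PySem.Dict Nat (PySem.Set Int))
    (hbm : ∀ k cache, 1 ≤ k → k ≤ bound → InvCache N cache →
      InvCache N (bm k cache).2 ∧ ∀ x, x ∈ (bm k cache).1 ↔ Reach N k x) :
    ∀ (l : List Nat), (∀ j ∈ l, 1 ≤ j ∧ j ≤ bound ∧ 1 ≤ i - j ∧ i - j ≤ bound) →
      ∀ (p : PySem.Set Int × PySem.Dict Nat (PySem.Set Int)), InvCache N p.2 →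
        InvCache N (l.foldl (memoStep bm i) p).2 ∧
        (∀ x, x ∈ (l.foldl (memoStep bm i) p).1 ↔ x ∈ p.1 ∨
          ∃ j ∈ l, ∃ A B, Reach N j A ∧ Reach N (i - j) B ∧ x ∈ operation A B) := by
  intro l
  induction l with
  | nil => intro _ p hp; exact ⟨hp, by simp⟩
  | cons j t iht =>
    intro hl p hp
    obtain ⟨hj1, hj2, hk1, hk2⟩ := hl j (List.mem_cons_self ..)
    obtain ⟨hAinv, hAmem⟩ := hbm j p.2 hj1 hj2 hp
    obtain ⟨hBinv, hBmem⟩ := hbm (i - j) _ hk1 hk2 hAinv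
    have hstep_inv : InvCache N (memoStep bm i p j).2 := hBinv
    have hstep_mem : ∀ x, x ∈ (memoStep bm i p j).1 ↔ x ∈ p.1 ∨
        ∃ A B, Reach N j A ∧ Reach N (i - j) B ∧ x ∈ operation A B := by
      intro x
      show x ∈ (bm j p.2).1.foldl _ p.1 ↔ _
      rw [mem_AB_fold]
      constructor
      · rintro (h | ⟨A, hA, B, hB, hop⟩)
        · exact Or.inl h
        · exact Or.inr ⟨A, B, (hAmem A).1 hA, (hBmem B).1 hB, hop⟩
      · rintro (h | ⟨A, B, hA, hB, hop⟩)
        · exact Or.inl h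
        · exact Or.inr ⟨A, (hAmem A).2 hA, B, (hBmem B).2 hB, hop⟩
    obtain ⟨hfin_inv, hfin_mem⟩ :=
      iht (fun j' hj' => hl j' (List.mem_cons_of_mem j hj')) (memoStep bm i p j)
        hstep_inv
    rw [List.foldl_cons]
    refine ⟨hfin_inv, fun x => ?_⟩
    rw [hfin_mem, hstep_mem]
    constructor
    · rintro ((h | ⟨A, B, hA, hB, hop⟩) | ⟨j', hj', rest⟩)
      · exact Or.inl h
      · exact Or.inr ⟨j, List.mem_cons_self .., A, B, hA, hB, hop⟩
      · exact Or.inr ⟨j', List.mem_cons_of_mem j hj', rest⟩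
    · rintro (h | ⟨j', hj', A, B, hA, hB, hop⟩)
      · exact Or.inl (Or.inl h)
      · rcases List.mem_cons.1 hj' with rfl | hj''
        · exact Or.inl (Or.inr ⟨A, B, hA, hB, hop⟩)
        · exact Or.inr ⟨j', hj'', A, B, hA, hB, hop⟩

theorem buildMemo_spec (N : Int) :
    ∀ (fuel : Nat), ∀ (i : Nat) (cache : PySem.Dict Nat (PySem.Set Int)),
      1 ≤ i → i ≤ fuel → InvCache N cache →
      InvCache N (buildMemo N fuel i cache).2 ∧
        (∀ x, x ∈ (buildMemo N fuel i cache).1 ↔ Reach N i x) := by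
  intro fuel
  induction fuel with
  | zero => intro i cache h1 h2; omega
  | succ fuel ih =>
    intro i cache h1 h2 hinv
    cases hc : PySem.Dict.get? cache i with
    | some s =>
      simp only [buildMemo, hc]
      exact ⟨hinv, (hinv i s hc).2⟩
    | none =>
      simp only [buildMemo, hc]
      obtain ⟨hpinv, hpmem⟩ := memoFold_spec N i fuel (fun k c => buildMemo N fuel k c)
        (fun k c hk1 hk2 hc' => ih k c hk1 hk2 hc')
        (List.range' 1 (i / 2))
        (by
          intro j hj
          rw [List.mem_range'] at hj
          obtain ⟨m, hm1, hm2⟩ := hj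
          refine ⟨by omega, by omega, by omega, by omega⟩)
        (PySem.Set.ofList [repInt N i], cache)
        hinv
      -- membership of the finished level set is exactly Reach N i
      have hchar : ∀ x, x ∈ ((List.range' 1 (i / 2)).foldl
          (memoStep (fun k c => buildMemo N fuel k c) i)
          (PySem.Set.ofList [repInt N i], cache)).1 ↔ Reach N i x := by
        intro x
        rw [hpmem]
        simp only [PySem.Set.mem_ofList, List.mem_cons, List.not_mem_nil, or_false]
        constructor
        · rintro (rfl | ⟨j, hj, A, B, hA, hB, hop⟩)
          · exact Reach.base i h1
          · rw [List.mem_range'] at hj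
            obtain ⟨m, hm1, hm2⟩ := hj
            have := Reach.op j (i - j) A B x hA hB hop
            rwa [show j + (i - j) = i by omega] at this
        · intro hr
          cases hr with
          | base _ _ => exact Or.inl rfl
          | op j k A B _ hA hB hop =>
            have hj : 1 ≤ j := reach_pos hA
            have hk : 1 ≤ k := reach_pos hB
            by_cases hsplit : j ≤ (j + k) / 2
            · refine Or.inr ⟨j, ?_, A, B, hA, ?_, hop⟩
              · rw [List.mem_range']; exact ⟨j - 1, by omega, by omega⟩
              · rwa [show j + k - j = k by omega]
            · -- j is the larger half: swap the split and use operation's symmetry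
              refine Or.inr ⟨k, ?_, B, A, hB, ?_, (operation_comm A B _).1 hop⟩
              · rw [List.mem_range']; exact ⟨k - 1, by omega, by omega⟩
              · rwa [show j + k - k = j by omega]
      refine ⟨?_, hchar⟩
      intro k s hk
      rw [PySem.Dict.get?_insert] at hk
      by_cases hki : k = i
      · rw [if_pos hki] at hk
        cases hk
        subst hki
        exact ⟨by omega, hchar⟩
      · rw [if_neg hki] at hk
        exact hpinv k s hk

theorem hitsFold_spec (N number : Int) (i : Nat) :
    ∀ (l : List Nat), (∀ j ∈ l, 1 ≤ j ∧ j ≤ i ∧ 1 ≤ i - j ∧ i - j ≤ i) →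
      ∀ (p : Bool × PySem.Dict Nat (PySem.Set Int)), InvCache N p.2 →
        InvCache N ((l.foldl (fun p j =>
            let q1 := buildMemo N i j p.2
            let q2 := buildMemo N i (i - j) q1.2
            (p.1 || q1.1.any (fun A =>
                q2.1.any (fun B => decide (number ∈ operation A B))), q2.2)) p)).2 ∧
        (((l.foldl (fun p j =>
            let q1 := buildMemo N i j p.2
            let q2 := buildMemo N i (i - j) q1.2
            (p.1 || q1.1.any (fun A =>
                q2.1.any (fun B => decide (number ∈ operation A B))), q2.2)) p)).1 = true ↔
          p.1 = true ∨ ∃ j ∈ l, ∃ A B, Reach N j A ∧ Reach N (i - j) B ∧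
            number ∈ operation A B) := by
  intro l
  induction l with
  | nil => intro _ p hp; exact ⟨hp, by simp⟩
  | cons j t iht =>
    intro hl p hp
    obtain ⟨hj1, hj2, hk1, hk2⟩ := hl j (List.mem_cons_self ..)
    obtain ⟨hAinv, hAmem⟩ := buildMemo_spec N i j p.2 hj1 hj2 hp
    obtain ⟨hBinv, hBmem⟩ := buildMemo_spec N i (i - j) _ hk1 hk2 hAinv
    have hstep_mem :
        (p.1 || (buildMemo N i j p.2).1.any (fun A =>
          (buildMemo N i (i - j) (buildMemo N i j p.2).2).1.any
            (fun B => decide (number ∈ operation A B)))) = true ↔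
        p.1 = true ∨ ∃ A B, Reach N j A ∧ Reach N (i - j) B ∧
          number ∈ operation A B := by
      rw [Bool.or_eq_true, List.any_eq_true]
      constructor
      · rintro (h | ⟨A, hA, h2⟩)
        · exact Or.inl h
        · rw [List.any_eq_true] at h2
          obtain ⟨B, hB, h3⟩ := h2
          rw [decide_eq_true_iff] at h3
          exact Or.inr ⟨A, B, (hAmem A).1 hA, (hBmem B).1 hB, h3⟩
      · rintro (h | ⟨A, B, hA, hB, hop⟩)
        · exact Or.inl h
        · refine Or.inr ⟨A, (hAmem A).2 hA, ?_⟩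
          rw [List.any_eq_true]
          exact ⟨B, (hBmem B).2 hB, by rw [decide_eq_true_iff]; exact hop⟩
    obtain ⟨hfin_inv, hfin_mem⟩ :=
      iht (fun j' hj' => hl j' (List.mem_cons_of_mem j hj'))
        ((p.1 || (buildMemo N i j p.2).1.any (fun A =>
            (buildMemo N i (i - j) (buildMemo N i j p.2).2).1.any
              (fun B => decide (number ∈ operation A B)))),
         (buildMemo N i (i - j) (buildMemo N i j p.2).2).2) hBinv
    rw [List.foldl_cons]
    refine ⟨hfin_inv, ?_⟩
    rw [hfin_mem]
    show (_ = true ∨ _) ↔ _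
    rw [hstep_mem]
    constructor
    · rintro ((h | ⟨A, B, hA, hB, hop⟩) | ⟨j', hj', rest⟩)
      · exact Or.inl h
      · exact Or.inr ⟨j, List.mem_cons_self .., A, B, hA, hB, hop⟩
      · exact Or.inr ⟨j', List.mem_cons_of_mem j hj', rest⟩
    · rintro (h | ⟨j', hj', A, B, hA, hB, hop⟩)
      · exact Or.inl (Or.inl h)
      · rcases List.mem_cons.1 hj' with rfl | hj''
        · exact Or.inl (Or.inr ⟨A, B, hA, hB, hop⟩)
        · exact Or.inr ⟨j', hj'', A, B, hA, hB, hop⟩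

theorem hitsMemo_spec (N number : Int) (i : Nat)
    (cache : PySem.Dict Nat (PySem.Set Int)) (h1 : 1 ≤ i) (hinv : InvCache N cache) :
    InvCache N (hitsMemo N number i cache).2 ∧
      ((hitsMemo N number i cache).1 = true ↔ Reach N i number) := by
  unfold hitsMemo
  by_cases hbeq : number = repInt N i
  · rw [if_pos (by simpa using hbeq)]
    refine ⟨hinv, ?_⟩
    simp only [true_iff]
    rw [hbeq]
    exact Reach.base i h1
  · rw [if_neg (by simpa using hbeq)]
    obtain ⟨hfinv, hfmem⟩ := hitsFold_spec N number i (List.range' 1 (i - 1))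
      (by
        intro j hj
        rw [List.mem_range'] at hj
        obtain ⟨m, hm1, hm2⟩ := hj
        refine ⟨by omega, by omega, by omega, by omega⟩)
      (false, cache) hinv
    refine ⟨hfinv, ?_⟩
    rw [hfmem]
    constructor
    · rintro (h | ⟨j, hj, A, B, hA, hB, hop⟩)
      · simp at h
      · rw [List.mem_range'] at hj
        obtain ⟨m, hm1, hm2⟩ := hj
        have := Reach.op j (i - j) A B number hA hB hop
        rwa [show j + (i - j) = i by omega] at this
    · intro hr
      cases hr with
      | base _ _ => exact absurd rfl hbeq
      | op j k A B _ hA hB hop =>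
        have hj : 1 ≤ j := reach_pos hA
        have hk : 1 ≤ k := reach_pos hB
        refine Or.inr ⟨j, ?_, A, B, hA, ?_, hop⟩
        · rw [List.mem_range']; exact ⟨j - 1, by omega, by omega⟩
        · rwa [show j + k - j = k by omega]

theorem loopA_eq_searchB (N number : Int) :
    ∀ (m i : Nat) (cache : PySem.Dict Nat (PySem.Set Int)), 1 ≤ i → InvCache N cache →
      loopA N number (List.range' i m) (tableA N (i - 1)) =
        searchB N number (List.range' i m) cache := by
  intro m
  induction m with
  | zero => intro i cache h1 _; simp [loopA, searchB]
  | succ m ih =>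
    intro i cache h1 hinv
    rw [List.range'_succ, loopA, searchB]
    obtain ⟨hinv', hmem⟩ := hitsMemo_spec N number i cache h1 hinv
    have hiff : number ∈ fillLevel N (tableA N (i - 1)) i ↔
        (hitsMemo N number i cache).1 = true := by
      rw [level_reach N i h1, hmem]
    by_cases hA : number ∈ fillLevel N (tableA N (i - 1)) i
    · rw [if_pos hA, if_pos (hiff.1 hA)]
    · rw [if_neg hA, if_neg (fun hc => hA (hiff.2 hc))]
      have hdone : tableA N (i - 1) ++ [fillLevel N (tableA N (i - 1)) i] =
          tableA N (i + 1 - 1) := by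
        have h' : i + 1 - 1 = (i - 1) + 1 := by omega
        rw [h', tableA]
        have h'' : i - 1 + 1 = i := by omega
        rw [h'']
      rw [hdone]
      exact ih (i + 1) _ (by omega) hinv'

-- ===== VERDICT (by name: the statement is the Claim_ definition above) =====
theorem solution_spec : Claim_equal_solution := by
  intro N number _ _
  unfold Spec_solution solution solution_alt
  have hinv : InvCache N PySem.Dict.empty := by
    intro k s hk
    simp [PySem.Dict.get?_empty] at hk
  have := loopA_eq_searchB N number 8 1 PySem.Dict.empty le_rfl hinv
  simpa [tableA] using this
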